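-- pv_equiv track=rewrite | github.com/Brianvanwessel/BioGrinderPipeline | databaseGenerator/databaseGenerator.py | getNumberOfPossibleSequences
-- ===== SOURCE A (Python) =====
-- def getNumberOfPossibleSequences(records,primers):
--     possibleSequences = 0
--
--     for i in range(len(records)):
--           foundPrimer=False
--           numberOfPrimers=0
--           for i2 in range(len(primers)):
--                     if primers[i2] in records[i][1]:
--                         foundPrimer=True
--                         numberOfPrimers+=1
--           if foundPrimer == True:
--               possibleSequences+=1
--     return possibleSequences
-- ===== SOURCE B (Python) =====
-- def getNumberOfPossibleSequences(records, primers):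
--     primer_set = set(primers)
--     lengths = {len(p) for p in primers}
--     possibleSequences = 0
--     for _, seq in records:
--         n = len(seq)
--         if any(seq[j:j + L] in primer_set
--                for L in lengths if L <= n
--                for j in range(n - L + 1)):
--             possibleSequences += 1
--     return possibleSequences
-- ===== Notes on version B (the rewrite author's own statement) =====
-- stated objective: faster
-- what changed: B inverts the matching: instead of running a separate substring search per primer per record, it hashes the primers into a set once and scans each record by sliding windows of the distinct primer lengths, testing each window against the set.
import Mathlib
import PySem

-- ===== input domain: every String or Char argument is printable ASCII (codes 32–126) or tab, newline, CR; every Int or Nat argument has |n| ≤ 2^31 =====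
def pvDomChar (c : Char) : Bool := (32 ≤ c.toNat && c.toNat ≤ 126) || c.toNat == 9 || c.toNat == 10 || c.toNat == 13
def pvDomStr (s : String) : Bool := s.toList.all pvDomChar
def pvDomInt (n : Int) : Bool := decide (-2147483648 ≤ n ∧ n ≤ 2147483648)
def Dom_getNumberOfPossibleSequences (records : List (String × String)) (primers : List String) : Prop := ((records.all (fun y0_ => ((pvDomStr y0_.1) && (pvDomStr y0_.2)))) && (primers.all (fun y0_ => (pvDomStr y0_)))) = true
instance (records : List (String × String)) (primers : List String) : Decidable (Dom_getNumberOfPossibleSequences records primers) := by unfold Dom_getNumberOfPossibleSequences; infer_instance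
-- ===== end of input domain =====

-- B replaces A's per-primer substring searches by one set of primers plus a sliding-window
-- scan of each record over the distinct primer lengths (objective: alternative algorithm).

-- ===== PORT A =====
-- A: 'for i in range(len(records))', 'for i2 in range(len(primers))' with
-- 'primers[i2] in records[i][1]'; loop state (foundPrimer, numberOfPrimers); the
-- 'if foundPrimer == True' test reads the pair's first component.
def getNumberOfPossibleSequences (records : List (String × String)) (primers : List String) : Int :=
  (PySem.List.pyRange 0 records.length 1).foldl (fun possibleSequences i =>
    if ((PySem.List.pyRange 0 primers.length 1).foldl (fun (st : Bool × Int) i2 =>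
          if PySem.Str.isIn (PySem.List.pyGetD primers i2 "") (PySem.List.pyGetD records i ("", "")).2
          then (true, st.2 + 1) else st) (false, 0)).1 = true
    then possibleSequences + 1 else possibleSequences) 0

-- ===== PORT B =====
-- Source B: primer_set = set(primers); lengths = {len(p) for p in primers}; per record, any()
-- over windows seq[j:j+L] (slice with 0 ≤ j, j+L ≤ len(seq): exactly (seq.drop j).take L).
-- 'any' over the lengths set is order-independent, so consuming the Set's list is exact.
def getNumberOfPossibleSequences_alt (records : List (String × String)) (primers : List String) : Int :=
  let primerSet : PySem.Set String := PySem.Set.ofList primers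
  let lengths : PySem.Set Nat := PySem.Set.ofList (primers.map (fun p => p.toList.length))
  records.foldl (fun possibleSequences r =>
    let seq := r.2.toList
    let n := seq.length
    if lengths.any (fun L => decide (L ≤ n) &&
        (List.range (n - L + 1)).any (fun j =>
          PySem.Set.contains primerSet (String.ofList ((seq.drop j).take L))))
    then possibleSequences + 1 else possibleSequences) 0

-- ===== PRECONDITION & SPEC =====
def Spec_getNumberOfPossibleSequences (records : List (String × String)) (primers : List String) (out : Int) : Prop := out = getNumberOfPossibleSequences_alt records primers
instance (records : List (String × String)) (primers : List String) (out : Int) : Decidable (Spec_getNumberOfPossibleSequences records primers out) := by unfold Spec_getNumberOfPossibleSequences; infer_instance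

-- ===== CLAIM (what is proved, stated in full; the proofs are below) =====
def Claim_equal_getNumberOfPossibleSequences : Prop := ∀ (records : List (String × String)) (primers : List String), Dom_getNumberOfPossibleSequences records primers → Spec_getNumberOfPossibleSequences records primers (getNumberOfPossibleSequences records primers)

-- ===== LEMMAS AND PROOFS =====

-- A's inner loop flag equals 'some primer is a substring' (loop state generalized).
theorem pvInnerFlag (primers : List String) (s : String) (b : Bool) (k : Int) :
    (primers.foldl (fun (st : Bool × Int) p =>
      if PySem.Str.isIn p s then (true, st.2 + 1) else st) (b, k)).1
      = (b || primers.any (fun p => PySem.Str.isIn p s)) := by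
  induction primers generalizing b k with
  | nil => simp
  | cons p t ih =>
    rw [List.foldl_cons, List.any_cons]
    by_cases h : PySem.Str.isIn p s = true
    · rw [if_pos h, ih, h]; simp
    · rw [if_neg h, ih, Bool.eq_false_iff.mpr h]; simp

-- 'some primer is a substring of seq' ↔ 'some window of a primer length is in the primer set'.
theorem pvWindowEq (seq : List Char) (primers : List String) :
    primers.any (fun p => PySem.Chars.isIn p.toList seq)
      = (PySem.Set.ofList (primers.map (fun p => p.toList.length))).any
          (fun L => decide (L ≤ seq.length) &&
            (List.range (seq.length - L + 1)).any (fun j =>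
              PySem.Set.contains (PySem.Set.ofList primers)
                (String.ofList ((seq.drop j).take L)))) := by
  rw [Bool.eq_iff_iff]
  simp only [List.any_eq_true, Bool.and_eq_true, decide_eq_true_eq, List.mem_range,
    PySem.Set.contains_iff, PySem.Set.mem_ofList, List.mem_map]
  constructor
  · rintro ⟨p, hp, hin⟩
    rw [← PySem.Chars.exists_prefix_drop_iff_isIn] at hin
    obtain ⟨j, hj⟩ := hin
    have hmk : String.ofList p.toList = p := String.ofList_toList
    refine ⟨p.toList.length, ⟨p, hp, rfl⟩, ?_⟩
    by_cases hjl : j ≤ seq.length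
    · have hlen : p.toList.length ≤ (seq.drop j).length := hj.length_le
      rw [List.length_drop] at hlen
      refine ⟨by omega, j, by omega, ?_⟩
      have htake : (seq.drop j).take p.toList.length = p.toList :=
        (List.prefix_iff_eq_take.mp hj).symm
      rw [htake, hmk]
      exact hp
    · -- j past the end: seq.drop j = [], so p = [] and window length 0 at position 0 works
      have hnil : p.toList = [] := by
        rw [List.drop_eq_nil_of_le (by omega)] at hj
        exact List.prefix_nil.mp hj
      refine ⟨by simp [hnil], 0, by omega, ?_⟩
      have htake : List.take p.toList.length (List.drop 0 seq) = p.toList := by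
        simp [hnil]
      rw [htake, hmk]
      exact hp
  · rintro ⟨L, _, _, j, _, hmem⟩
    refine ⟨String.ofList ((seq.drop j).take L), hmem, ?_⟩
    rw [← PySem.Chars.exists_prefix_drop_iff_isIn]
    refine ⟨j, ?_⟩
    rw [String.toList_ofList]
    exact List.take_prefix L (seq.drop j)

-- the two per-record steps agree
theorem pvStepEq (primers : List String) (acc : Int) (r : String × String) :
    (if ((PySem.List.pyRange 0 primers.length 1).foldl (fun (st : Bool × Int) i2 =>
          if PySem.Str.isIn (PySem.List.pyGetD primers i2 "") r.2
          then (true, st.2 + 1) else st) (false, 0)).1 = true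
     then acc + 1 else acc)
    = (if (PySem.Set.ofList (primers.map (fun p => p.toList.length))).any
          (fun L => decide (L ≤ r.2.toList.length) &&
            (List.range (r.2.toList.length - L + 1)).any (fun j =>
              PySem.Set.contains (PySem.Set.ofList primers)
                (String.ofList ((r.2.toList.drop j).take L))))
       then acc + 1 else acc) := by
  have h1 := PySem.List.foldl_pyRange_zero_pyGetD' primers ""
    (fun (st : Bool × Int) p => if PySem.Str.isIn p r.2 then (true, st.2 + 1) else st)
    ((false : Bool), (0 : Int))
  rw [h1, pvInnerFlag]
  have h2 : primers.any (fun p => PySem.Str.isIn p r.2)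
      = primers.any (fun p => PySem.Chars.isIn p.toList r.2.toList) := by
    simp [PySem.Str.isIn]
  rw [Bool.false_or, h2, pvWindowEq]

-- ===== VERDICT (by name: the statement is the Claim_ definition above) =====
theorem getNumberOfPossibleSequences_spec : Claim_equal_getNumberOfPossibleSequences := by
  intro records primers _
  unfold Spec_getNumberOfPossibleSequences getNumberOfPossibleSequences getNumberOfPossibleSequences_alt
  rw [PySem.List.foldl_pyRange_zero_pyGetD' records ("", "")
    (fun (acc : Int) (r : String × String) =>
      if ((PySem.List.pyRange 0 primers.length 1).foldl (fun (st : Bool × Int) i2 =>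
            if PySem.Str.isIn (PySem.List.pyGetD primers i2 "") r.2
            then (true, st.2 + 1) else st) (false, 0)).1 = true
      then acc + 1 else acc) 0]
  have hf : (fun (acc : Int) (r : String × String) =>
      if ((PySem.List.pyRange 0 primers.length 1).foldl (fun (st : Bool × Int) i2 =>
            if PySem.Str.isIn (PySem.List.pyGetD primers i2 "") r.2
            then (true, st.2 + 1) else st) (false, 0)).1 = true
      then acc + 1 else acc)
      = (fun (acc : Int) (r : String × String) =>
      if (PySem.Set.ofList (primers.map (fun p => p.toList.length))).any
          (fun L => decide (L ≤ r.2.toList.length) &&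
            (List.range (r.2.toList.length - L + 1)).any (fun j =>
              PySem.Set.contains (PySem.Set.ofList primers)
                (String.ofList ((r.2.toList.drop j).take L))))
      then acc + 1 else acc) := by
    funext acc r
    exact pvStepEq primers acc r
  rw [hf]
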